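-- pv_equiv track=rewrite | github.com/wilmurillo-ai/Design-Assistant | .skills/openclaw-skills/skills/charlie-morrison/circleci-config-validator/scripts/circleci_config_validator.py | determine_exit_code
-- ===== SOURCE A (Python) =====
-- def determine_exit_code(issues, strict):
--     errors = [i for i in issues if i["severity"] == "E"]
--     warnings = [i for i in issues if i["severity"] == "W"]
--     if errors:
--         return 1
--     if strict and warnings:
--         return 1
--     return 0
-- ===== SOURCE B (Python) =====
-- def determine_exit_code(issues, strict):
--     # Rank severities numerically and take the worst: "E" always rates exit 1,
--     # "W" rates 1 only in strict mode, anything else rates 0.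
--     code_of = {"E": 1, "W": int(strict)}
--     return max((code_of.get(i["severity"], 0) for i in issues), default=0)
-- ===== Notes on version B (the rewrite author's own statement) =====
-- stated objective: alternative
-- what changed: Replaces the two filter-then-test-emptiness passes and the early-return branch chain by a severity-to-exit-code ranking table and a single max-reduction over the mapped codes.
import Mathlib
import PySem

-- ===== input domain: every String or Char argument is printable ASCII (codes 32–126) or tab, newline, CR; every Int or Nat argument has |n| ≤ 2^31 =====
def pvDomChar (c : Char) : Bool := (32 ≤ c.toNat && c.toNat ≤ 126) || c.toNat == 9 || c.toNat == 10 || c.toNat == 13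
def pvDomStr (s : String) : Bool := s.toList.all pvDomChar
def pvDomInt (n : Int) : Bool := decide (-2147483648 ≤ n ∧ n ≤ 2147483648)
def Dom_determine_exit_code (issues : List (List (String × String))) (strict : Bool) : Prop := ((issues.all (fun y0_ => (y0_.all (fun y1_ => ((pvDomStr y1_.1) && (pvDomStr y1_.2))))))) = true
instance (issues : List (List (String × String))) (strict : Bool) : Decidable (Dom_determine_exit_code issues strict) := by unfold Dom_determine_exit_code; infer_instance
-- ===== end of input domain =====

-- B ranks severities with a table and max-reduces; A filters twice and tests emptiness (return value only).

-- ===== PORT A =====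
-- Port of A: i["severity"] is a first-match lookup; Pre_ excludes issues missing the key (KeyError),
-- so getD "" agrees with Python's raising access on every admitted input.
def determine_exit_code (issues : List (List (String × String))) (strict : Bool) : Int :=
  let errors := issues.filter (fun i => ((i.lookup "severity").getD "") == "E")
  let warnings := issues.filter (fun i => ((i.lookup "severity").getD "") == "W")
  if !errors.isEmpty then 1
  else if strict && !warnings.isEmpty then 1
  else 0

-- ===== PORT B =====
-- Severity-to-exit-code table, then max(codes, default=0): [] yields the default, else a max fold.
def determine_exit_code_alt (issues : List (List (String × String))) (strict : Bool) : Int :=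
  let code_of : PySem.Dict String Int :=
    (PySem.Dict.empty.insert "E" 1).insert "W" (if strict then 1 else 0)
  let codes := issues.map (fun i => code_of.getD ((i.lookup "severity").getD "") 0)
  match codes with
  | [] => 0
  | c :: rest => rest.foldl max c

-- ===== PRECONDITION & SPEC =====
-- Pre_ excludes exactly the inputs where some issue lacks a "severity" key: there Python A raises KeyError.
def Pre_determine_exit_code (issues : List (List (String × String))) (strict : Bool) : Prop :=
  ∀ i ∈ issues, (i.lookup "severity").isSome = true
instance (issues : List (List (String × String))) (strict : Bool) : Decidable (Pre_determine_exit_code issues strict) := by unfold Pre_determine_exit_code; infer_instance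
def pvWitness_determine_exit_code : (List (List (String × String))) × Bool :=
  ([[("severity", "E")], [("severity", "I")]], true)
def Spec_determine_exit_code (issues : List (List (String × String))) (strict : Bool) (out : Int) : Prop := out = determine_exit_code_alt issues strict
instance (issues : List (List (String × String))) (strict : Bool) (out : Int) : Decidable (Spec_determine_exit_code issues strict out) := by unfold Spec_determine_exit_code; infer_instance

-- ===== CLAIM (what is proved, stated in full; the proofs are below) =====
def Claim_equal_determine_exit_code : Prop := ∀ (issues : List (List (String × String))) (strict : Bool), Dom_determine_exit_code issues strict → Pre_determine_exit_code issues strict → Spec_determine_exit_code issues strict (determine_exit_code issues strict)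

-- ===== LEMMAS AND PROOFS =====

-- A filtered list is nonempty exactly when some element satisfies the predicate.
theorem pv_filter_any (issues : List (List (String × String))) (p : List (String × String) → Bool) :
    (!(issues.filter p).isEmpty) = issues.any p := by
  induction issues with
  | nil => simp
  | cons i rest ih => by_cases h : p i <;> simp [h, ih]

-- Each mapped code is: 1 for "E", int(strict) for "W", 0 otherwise.
theorem pv_code_eq (strict : Bool) (i : List (String × String)) :
    ((PySem.Dict.empty.insert "E" (1 : Int)).insert "W" (if strict then 1 else 0)).getD
        ((i.lookup "severity").getD "") 0
    = (if ((i.lookup "severity").getD "") = "E" then 1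
       else if strict ∧ ((i.lookup "severity").getD "") = "W" then 1 else 0) := by
  by_cases hE : ((i.lookup "severity").getD "") = "E"
  · rw [hE]; cases strict <;> decide
  · by_cases hW : ((i.lookup "severity").getD "") = "W"
    · rw [hW]; cases strict <;> decide
    · have h1 : ("E" == ((i.lookup "severity").getD "")) = false := by
        simpa [beq_iff_eq] using fun h => hE h.symm
      have h2 : ("W" == ((i.lookup "severity").getD "")) = false := by
        simpa [beq_iff_eq] using fun h => hW h.symm
      simp [PySem.Dict.getD, PySem.Dict.get?, PySem.Dict.insert, PySem.Dict.empty,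
        List.find?, h1, h2, hE, hW]

-- max fold over 0/1-valued codes is the indicator of 'some code is 1'.
theorem pv_maxfold_indicator (l : List Int) (a : Int)
    (hl : ∀ x ∈ l, x = 0 ∨ x = 1) (ha : a = 0 ∨ a = 1) :
    l.foldl max a = (if a = 1 ∨ ∃ x ∈ l, x = 1 then (1 : Int) else 0) := by
  induction l generalizing a with
  | nil => rcases ha with h | h <;> simp [h]
  | cons x rest ih =>
    have hx := hl x (by simp)
    have hrest : ∀ y ∈ rest, y = 0 ∨ y = 1 := fun y hy => hl y (by simp [hy])
    have key : max a x = 0 ∨ max a x = 1 := by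
      rcases hx with hx | hx <;> rcases ha with h | h <;> rw [hx, h] <;> norm_num
    rw [List.foldl_cons, ih _ hrest key]
    have hiff : (max a x = 1 ∨ ∃ y ∈ rest, y = 1) ↔ (a = 1 ∨ ∃ y ∈ x :: rest, y = 1) := by
      constructor
      · rintro (hm | ⟨y, hy, hy1⟩)
        · rcases ha with h | h
          · rcases hx with hx' | hx'
            · rw [h, hx'] at hm; norm_num at hm
            · exact Or.inr ⟨x, by simp, hx'⟩
          · exact Or.inl h
        · exact Or.inr ⟨y, by simp [hy], hy1⟩
      · rintro (h | ⟨y, hy, hy1⟩)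
        · left; rcases hx with hx' | hx' <;> rw [h, hx'] <;> norm_num
        · rcases List.mem_cons.mp hy with rfl | hy'
          · left; rcases ha with h | h <;> rw [h, hy1] <;> norm_num
          · exact Or.inr ⟨y, hy', hy1⟩
    rw [if_congr hiff rfl rfl]

-- ===== VERDICT (by name: the statement is the Claim_ definition above) =====
theorem determine_exit_code_spec : Claim_equal_determine_exit_code := by
  intro issues strict _ _
  unfold Spec_determine_exit_code determine_exit_code determine_exit_code_alt
  simp only [pv_code_eq, pv_filter_any]
  cases issues with
  | nil => simp
  | cons i rest =>
    simp only [List.map_cons]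
    rw [pv_maxfold_indicator]
    · have hcond : ((if ((i.lookup "severity").getD "") = "E" then (1:Int)
          else if strict ∧ ((i.lookup "severity").getD "") = "W" then 1 else 0) = 1
          ∨ ∃ x ∈ rest.map (fun j => if ((j.lookup "severity").getD "") = "E" then (1:Int)
              else if strict ∧ ((j.lookup "severity").getD "") = "W" then 1 else 0), x = 1)
          ↔ ∃ j ∈ i :: rest, (((j.lookup "severity").getD "") = "E"
              ∨ (strict = true ∧ ((j.lookup "severity").getD "") = "W")) := by
        simp only [List.mem_map, List.mem_cons]
        constructor
        · rintro (h | ⟨x, ⟨j, hj, rfl⟩, hx1⟩)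
          · refine ⟨i, Or.inl rfl, ?_⟩
            split_ifs at h with h1 h2 <;> simp_all
          · refine ⟨j, Or.inr hj, ?_⟩
            split_ifs at hx1 with h1 h2 <;> simp_all
        · rintro ⟨j, (rfl | hj), hsev⟩
          · left; split_ifs with h1 h2 <;> simp_all
          · right
            refine ⟨_, ⟨j, hj, rfl⟩, ?_⟩
            split_ifs with h1 h2 <;> simp_all
      rw [if_congr hcond rfl rfl]
      have hanyE : ((i :: rest).any (fun j => ((j.lookup "severity").getD "") == "E")) = true
          ↔ ∃ j ∈ i :: rest, ((j.lookup "severity").getD "") = "E" := by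
        simp [List.any_eq_true]
      have hanyW : ((i :: rest).any (fun j => ((j.lookup "severity").getD "") == "W")) = true
          ↔ ∃ j ∈ i :: rest, ((j.lookup "severity").getD "") = "W" := by
        simp [List.any_eq_true]
      by_cases hEx : ∃ j ∈ i :: rest, ((j.lookup "severity").getD "") = "E"
      · rw [hanyE.mpr hEx]
        have hc : ∃ j ∈ i :: rest, (((j.lookup "severity").getD "") = "E"
            ∨ (strict = true ∧ ((j.lookup "severity").getD "") = "W")) := by
          obtain ⟨j, hj, hje⟩ := hEx
          exact ⟨j, hj, Or.inl hje⟩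
        rw [if_pos hc]
        simp
      · have h1 : ((i :: rest).any (fun j => ((j.lookup "severity").getD "") == "E")) = false := by
          rw [Bool.eq_false_iff]; intro h; exact hEx (hanyE.mp h)
        rw [h1]
        cases strict with
        | false =>
          have hc : ¬ ∃ j ∈ i :: rest, (((j.lookup "severity").getD "") = "E"
              ∨ (false = true ∧ ((j.lookup "severity").getD "") = "W")) := by
            rintro ⟨j, hj, hje | ⟨hs, _⟩⟩
            · exact hEx ⟨j, hj, hje⟩
            · exact Bool.false_ne_true hs
          rw [if_neg hc]
          simp
        | true =>
          by_cases hWx : ∃ j ∈ i :: rest, ((j.lookup "severity").getD "") = "W"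
          · rw [hanyW.mpr hWx]
            have hc : ∃ j ∈ i :: rest, (((j.lookup "severity").getD "") = "E"
                ∨ (true = true ∧ ((j.lookup "severity").getD "") = "W")) := by
              obtain ⟨j, hj, hjw⟩ := hWx
              exact ⟨j, hj, Or.inr ⟨rfl, hjw⟩⟩
            rw [if_pos hc]
            simp
          · have h2 : ((i :: rest).any (fun j => ((j.lookup "severity").getD "") == "W")) = false := by
              rw [Bool.eq_false_iff]; intro h; exact hWx (hanyW.mp h)
            have hc : ¬ ∃ j ∈ i :: rest, (((j.lookup "severity").getD "") = "E"
                ∨ (true = true ∧ ((j.lookup "severity").getD "") = "W")) := by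
              rintro ⟨j, hj, hje | ⟨_, hjw⟩⟩
              · exact hEx ⟨j, hj, hje⟩
              · exact hWx ⟨j, hj, hjw⟩
            rw [h2, if_neg hc]
            simp
    · intro x hx
      simp only [List.mem_map] at hx
      obtain ⟨j, _, hj⟩ := hx
      split_ifs at hj <;> simp [← hj]
    · split_ifs <;> simp
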